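-- pv_equiv track=rewrite | github.com/HenryN-B/algorithm-visualization | naive_hull.py | bottom_most
-- ===== SOURCE A (Python) =====
-- def bottom_most(points):
--     lowest = points[0]
--     for point in points:
--         if lowest == point:
--             continue
--         if point[1] < lowest[1]:
--             lowest = point
--         elif point[1] == lowest[1]:
--             if point[0] > lowest[0]:
--                 lowest = point
--     return lowest
-- ===== SOURCE B (Python) =====
-- def bottom_most(points):
--     return sorted(points, key=lambda p: (p[1], -p[0]))[0]
-- ===== Notes on version B (the rewrite author's own statement) =====
-- stated objective: alternative
-- what changed: Replaces the best-so-far scan (with its three-way comparison chain) by one stable sort under the lexicographic key (y, -x) and returning the first element.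
import Mathlib
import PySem

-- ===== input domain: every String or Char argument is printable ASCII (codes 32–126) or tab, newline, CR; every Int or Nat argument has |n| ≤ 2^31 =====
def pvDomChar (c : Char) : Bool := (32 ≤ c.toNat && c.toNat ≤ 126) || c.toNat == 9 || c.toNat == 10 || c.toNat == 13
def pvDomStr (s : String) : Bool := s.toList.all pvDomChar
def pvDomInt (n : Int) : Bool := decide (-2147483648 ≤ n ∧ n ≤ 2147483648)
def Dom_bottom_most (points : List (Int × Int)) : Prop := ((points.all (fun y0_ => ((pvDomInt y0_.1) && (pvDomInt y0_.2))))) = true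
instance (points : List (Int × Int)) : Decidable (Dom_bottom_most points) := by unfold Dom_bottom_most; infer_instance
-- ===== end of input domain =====

-- B replaces A's best-so-far scan by a single stable sort under the lexicographic
-- key (y, -x) and returning the first element (alternative algorithm, not faster).


-- ===== PORT A =====
def bottom_most (points : List (Int × Int)) : Int × Int :=
  let lowest := PySem.List.pyGetD points 0 (0, 0)   -- points[0]; Pre_ requires points ≠ []
  points.foldl (fun lowest point =>
    if lowest == point then lowest
    else if point.2 < lowest.2 then point
    else if point.2 == lowest.2 then
      if point.1 > lowest.1 then point else lowest
    else lowest) lowest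

-- ===== PORT B =====
def bottom_most_alt (points : List (Int × Int)) : Int × Int :=
  PySem.List.pyGetD (PySem.List.sorted2 points (fun p => p.2) (fun p => -p.1)) 0 (0, 0)

-- ===== PRECONDITION & SPEC =====
-- Pre_ excludes only the empty list, on which Python A raises IndexError (points[0]).
def Pre_bottom_most (points : List (Int × Int)) : Prop := points ≠ []
instance (points : List (Int × Int)) : Decidable (Pre_bottom_most points) := by unfold Pre_bottom_most; infer_instance
def pvWitness_bottom_most : (List (Int × Int)) := [(1, 2), (0, 0)]
def Spec_bottom_most (points : List (Int × Int)) (out : Int × Int) : Prop := out = bottom_most_alt points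
instance (points : List (Int × Int)) (out : Int × Int) : Decidable (Spec_bottom_most points out) := by unfold Spec_bottom_most; infer_instance

-- ===== CLAIM (what is proved, stated in full; the proofs are below) =====
def Claim_equal_bottom_most : Prop := ∀ (points : List (Int × Int)), Dom_bottom_most points → Pre_bottom_most points → Spec_bottom_most points (bottom_most points)

-- ===== LEMMAS AND PROOFS =====

-- the strict lexicographic comparison sorted2 uses for the key (y, -x)
def pvBefore (a b : Int × Int) : Bool :=
  decide (a.2 < b.2) || (!decide (b.2 < a.2) && decide (-a.1 < -b.1))

-- the running-best step both sides reduce to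
def pvStep (l q : Int × Int) : Int × Int := if pvBefore q l then q else l

lemma sorted2_unfold (points : List (Int × Int)) :
    PySem.List.sorted2 points (fun p => p.2) (fun p => -p.1)
      = points.foldl (fun acc x => PySem.List.insertBy pvBefore x acc) [] := rfl

lemma stepA_eq (l q : Int × Int) :
    (if l == q then l
     else if q.2 < l.2 then q
     else if q.2 == l.2 then if q.1 > l.1 then q else l
     else l) = pvStep l q := by
  obtain ⟨la, lb⟩ := l; obtain ⟨qa, qb⟩ := q
  simp only [pvStep, pvBefore, Prod.mk.injEq, beq_iff_eq]
  split_ifs <;> simp_all <;> omega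

lemma pvBefore_irrefl (p : Int × Int) : pvBefore p p = false := by
  simp [pvBefore]

lemma head_foldl_insertBy (xs : List (Int × Int)) :
    ∀ (m : Int × Int) (t : List (Int × Int)), ∃ t',
      xs.foldl (fun acc x => PySem.List.insertBy pvBefore x acc) (m :: t)
        = (xs.foldl pvStep m) :: t' := by
  induction xs with
  | nil => intro m t; exact ⟨t, rfl⟩
  | cons x xs ih =>
    intro m t
    simp only [List.foldl_cons, PySem.List.insertBy]
    by_cases h : pvBefore x m
    · obtain ⟨t', ht'⟩ := ih x (m :: t)
      exact ⟨t', by simp [h, pvStep, ht']⟩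
    · obtain ⟨t', ht'⟩ := ih m (PySem.List.insertBy pvBefore x t)
      exact ⟨t', by simp [h, pvStep, ht']⟩

-- ===== VERDICT (by name: the statement is the Claim_ definition above) =====
theorem bottom_most_spec : Claim_equal_bottom_most := by
  intro points _ hpre
  obtain ⟨p, rest, rfl⟩ : ∃ p rest, points = p :: rest := by
    cases points with
    | nil => exact absurd rfl hpre
    | cons p rest => exact ⟨p, rest, rfl⟩
  unfold Spec_bottom_most bottom_most bottom_most_alt
  rw [sorted2_unfold]
  have hB : ((p :: rest).foldl (fun acc x => PySem.List.insertBy pvBefore x acc) []) =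
      rest.foldl (fun acc x => PySem.List.insertBy pvBefore x acc) [p] := by
    simp [PySem.List.insertBy]
  obtain ⟨t', ht'⟩ := head_foldl_insertBy rest p []
  rw [hB, ht']
  have hA : (p :: rest).foldl (fun lowest point =>
      if lowest == point then lowest
      else if point.2 < lowest.2 then point
      else if point.2 == lowest.2 then if point.1 > lowest.1 then point else lowest
      else lowest) (PySem.List.pyGetD (p :: rest) 0 (0, 0)) = rest.foldl pvStep p := by
    rw [PySem.List.pyGetD_zero_cons]
    have hc : ∀ (acc q : Int × Int),
        (if acc == q then acc
         else if q.2 < acc.2 then q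
         else if q.2 == acc.2 then if q.1 > acc.1 then q else acc
         else acc) = pvStep acc q := stepA_eq
    calc (p :: rest).foldl _ p = (p :: rest).foldl pvStep p := by
            exact PySem.List.foldl_congr_mem _ _ _ _ (fun acc q _ => hc acc q)
      _ = rest.foldl pvStep (pvStep p p) := by rw [List.foldl_cons]
      _ = rest.foldl pvStep p := by rw [pvStep, pvBefore_irrefl]; rfl
  rw [hA, PySem.List.pyGetD_zero_cons]
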